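-- pv_equiv track=rewrite | github.com/TongWu/JAVDB_AutoSpider | packages/python/javdb_migrations/tools/reconcile_d1_drift.py | _payload_cols_present
-- ===== SOURCE A (Python) =====
-- from typing import Any, Dict, Iterable, List, Optional, Sequence, Set, Tuple
--
-- def _payload_cols_present(
--     rows: Sequence[Dict[str, Any]],
--     payload_cols: Sequence[str],
-- ) -> Tuple[str, ...]:
--     """Keep optional payload columns only when the SQLite source exposes them."""
--     if not rows:
--         return tuple(payload_cols)
--     available = set(rows[0])
--     for row in rows[1:]:
--         available &= set(row)
--     return tuple(col for col in payload_cols if col in available)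
-- ===== SOURCE B (Python) =====
-- from typing import Any, Dict, Sequence, Tuple
--
-- def _payload_cols_present(
--     rows: Sequence[Dict[str, Any]],
--     payload_cols: Sequence[str],
-- ) -> Tuple[str, ...]:
--     """Keep optional payload columns only when every source row exposes them."""
--     return tuple(col for col in payload_cols if all(col in row for row in rows))
-- ===== Notes on version B (the rewrite author's own statement) =====
-- stated objective: simpler
-- what changed: Column-major re-check: instead of building the intersection set of all rows' key-sets and then filtering, B keeps each payload column iff a direct scan finds it in every row, with all() vacuously true on empty rows so the empty-rows guard disappears.
import Mathlib
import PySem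

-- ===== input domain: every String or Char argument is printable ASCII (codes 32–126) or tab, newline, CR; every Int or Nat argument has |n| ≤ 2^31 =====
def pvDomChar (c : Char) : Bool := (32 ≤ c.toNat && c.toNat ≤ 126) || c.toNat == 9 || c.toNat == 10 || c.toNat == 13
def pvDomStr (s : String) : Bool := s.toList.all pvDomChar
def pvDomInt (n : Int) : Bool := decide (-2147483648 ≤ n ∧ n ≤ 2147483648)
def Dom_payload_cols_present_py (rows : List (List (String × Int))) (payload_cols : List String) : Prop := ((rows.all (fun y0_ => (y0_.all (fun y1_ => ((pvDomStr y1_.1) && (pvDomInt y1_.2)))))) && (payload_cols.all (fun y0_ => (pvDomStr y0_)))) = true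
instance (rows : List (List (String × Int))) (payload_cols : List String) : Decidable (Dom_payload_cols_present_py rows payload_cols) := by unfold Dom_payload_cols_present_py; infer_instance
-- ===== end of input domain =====

-- B replaces A's build-intersection-set-then-filter with a column-major scan
-- (keep a column iff every row contains it); objective: simpler, same exact result.


-- ===== PORT A =====
-- if not rows: return tuple(payload_cols); available = set(rows[0]);
-- for row in rows[1:]: available &= set(row); return tuple(c for c in payload_cols if c in available)
def payload_cols_present_py (rows : List (List (String × Int))) (payload_cols : List String) : List String :=
  match rows with
  | [] => payload_cols
  | r0 :: rest =>
    let available : PySem.Set String :=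
      rest.foldl (fun acc row => PySem.Set.inter acc (PySem.Set.ofList (row.map Prod.fst)))
        (PySem.Set.ofList (r0.map Prod.fst))
    payload_cols.filter (fun col => PySem.Set.contains available col)

-- ===== PORT B =====
-- tuple(col for col in payload_cols if all(col in row for row in rows))
def payload_cols_present_py_alt (rows : List (List (String × Int))) (payload_cols : List String) : List String :=
  payload_cols.filter (fun col => rows.all (fun row => row.any (fun p => p.1 == col)))

-- ===== PRECONDITION & SPEC =====
def Spec_payload_cols_present_py (rows : List (List (String × Int))) (payload_cols : List String) (out : List String) : Prop := out = payload_cols_present_py_alt rows payload_cols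
instance (rows : List (List (String × Int))) (payload_cols : List String) (out : List String) : Decidable (Spec_payload_cols_present_py rows payload_cols out) := by unfold Spec_payload_cols_present_py; infer_instance

-- ===== CLAIM (what is proved, stated in full; the proofs are below) =====
def Claim_equal_payload_cols_present_py : Prop := ∀ (rows : List (List (String × Int))) (payload_cols : List String), Dom_payload_cols_present_py rows payload_cols → Spec_payload_cols_present_py rows payload_cols (payload_cols_present_py rows payload_cols)

-- ===== LEMMAS AND PROOFS =====

-- membership in the folded intersection = membership in the seed and in every folded row's key list
theorem pv_mem_foldl_inter (rest : List (List (String × Int))) (init : PySem.Set String) (col : String) :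
    col ∈ rest.foldl (fun acc row => PySem.Set.inter acc (PySem.Set.ofList (row.map Prod.fst))) init
      ↔ col ∈ init ∧ ∀ row ∈ rest, col ∈ row.map Prod.fst := by
  induction rest generalizing init with
  | nil => simp
  | cons r rs ih =>
    simp only [List.foldl_cons, ih, PySem.Set.mem_inter, PySem.Set.mem_ofList, List.mem_cons]
    constructor
    · rintro ⟨⟨h1, h2⟩, h3⟩
      exact ⟨h1, fun row hr => hr.elim (fun e => e ▸ h2) (h3 row)⟩
    · rintro ⟨h1, h3⟩
      exact ⟨⟨h1, h3 r (Or.inl rfl)⟩, fun row hr => h3 row (Or.inr hr)⟩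

-- ===== VERDICT (by name: the statement is the Claim_ definition above) =====
theorem payload_cols_present_py_spec : Claim_equal_payload_cols_present_py := by
  intro rows payload_cols _
  unfold Spec_payload_cols_present_py payload_cols_present_py payload_cols_present_py_alt
  match rows with
  | [] => simp
  | r0 :: rest =>
    simp only []
    apply List.filter_congr
    intro col _
    rw [PySem.Set.contains_eq_listContains, Bool.eq_iff_iff]
    simp only [List.contains_iff_mem, pv_mem_foldl_inter, PySem.Set.mem_ofList, List.all_cons,
      List.all_eq_true, List.any_eq_true, Bool.and_eq_true, beq_iff_eq, List.mem_map]
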